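-- pv_equiv track=rewrite | github.com/Rmac2323/stock-monitor | sec_risk_analyzer.py | _calculate_dilution_risk
-- ===== SOURCE A (Python) =====
-- def _calculate_dilution_risk(s3_filings, effect_filings) -> str:
--     """Calculate dilution risk based on shelf registrations"""
--     # Check for active shelf registration
--     has_active_shelf = False
--     shelf_size = "UNKNOWN"
--
--     # Look for recent S-3 with matching EFFECT
--     for s3 in s3_filings[:5]:  # Check recent 5
--         filing_date = s3.get('date')
--         if filing_date:
--             # Check if there's an EFFECT filing after this S-3
--             for effect in effect_filings:
--                 if effect.get('date', '') >= filing_date: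
--                     has_active_shelf = True
--                     break
--
--     if has_active_shelf:
--         # TODO: Parse filing content to determine shelf size
--         return "HIGH"
--     else:
--         return "LOW"
-- ===== SOURCE B (Python) =====
-- def _calculate_dilution_risk(s3_filings, effect_filings) -> str:
--     """Calculate dilution risk based on shelf registrations"""
--     max_effect = max((e.get('date', '') for e in effect_filings), default='')
--     valid = [s3.get('date') for s3 in s3_filings[:5] if s3.get('date')]
--     if valid and max_effect >= min(valid):
--         return "HIGH"
--     return "LOW"
-- ===== Notes on version B (the rewrite author's own statement) =====
-- stated objective: simpler
-- what changed: Replaces the nested per-S-3 scan over effect filings by two aggregate passes (max effect date, min valid S-3 date) and one comparison.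
import Mathlib
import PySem

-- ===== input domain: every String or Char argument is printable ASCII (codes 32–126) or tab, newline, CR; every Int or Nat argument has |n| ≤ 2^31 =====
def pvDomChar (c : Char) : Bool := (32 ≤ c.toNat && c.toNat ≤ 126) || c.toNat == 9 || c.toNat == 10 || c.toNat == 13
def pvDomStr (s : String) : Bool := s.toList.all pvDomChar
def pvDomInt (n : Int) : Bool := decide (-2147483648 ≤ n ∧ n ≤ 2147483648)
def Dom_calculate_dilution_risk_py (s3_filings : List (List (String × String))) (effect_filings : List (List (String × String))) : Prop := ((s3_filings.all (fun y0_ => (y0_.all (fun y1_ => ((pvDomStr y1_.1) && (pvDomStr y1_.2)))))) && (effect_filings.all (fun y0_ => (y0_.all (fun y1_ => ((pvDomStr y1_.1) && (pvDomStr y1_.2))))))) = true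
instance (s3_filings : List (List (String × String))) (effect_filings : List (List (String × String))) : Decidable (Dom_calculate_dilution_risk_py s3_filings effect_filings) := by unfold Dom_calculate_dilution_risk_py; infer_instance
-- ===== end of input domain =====

-- B replaces A's nested per-S-3 scan over effect filings by two aggregate passes
-- (max effect date, min valid S-3 date) followed by a single comparison (objective: simpler).

-- ===== PORT A =====
-- inner loop: 'for effect in effect_filings: if effect.get('date','') >= filing_date: … break'
def pvInnerA (effect_filings : List (List (String × String))) (filing_date : String) : Bool :=
  match effect_filings with
  | [] => false
  | e :: rest =>
      if filing_date ≤ (PySem.Dict.mk e).getD "date" "" then true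
      else pvInnerA rest filing_date

-- outer loop over s3_filings[:5]; acc = has_active_shelf
def pvOuterA (s3s : List (List (String × String))) (effect_filings : List (List (String × String))) (acc : Bool) : Bool :=
  match s3s with
  | [] => acc
  | s3 :: rest =>
      let acc' :=
        match (PySem.Dict.mk s3).get? "date" with
        | none => acc
        | some fd => if fd = "" then acc else (if pvInnerA effect_filings fd then true else acc)
      pvOuterA rest effect_filings acc'

def calculate_dilution_risk_py (s3_filings : List (List (String × String))) (effect_filings : List (List (String × String))) : String :=
  let has_active_shelf := pvOuterA (PySem.List.slice s3_filings none (some 5)) effect_filings false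
  if has_active_shelf then "HIGH" else "LOW"

-- ===== PORT B =====
-- valid S-3 dates: truthy s3.get('date') among the first 5 filings
def pvValidB (s3s : List (List (String × String))) : List String :=
  s3s.filterMap (fun s3 =>
    match (PySem.Dict.mk s3).get? "date" with
    | none => none
    | some d => if d = "" then none else some d)

def calculate_dilution_risk_py_alt (s3_filings : List (List (String × String))) (effect_filings : List (List (String × String))) : String :=
  let max_effect := (PySem.List.max? (effect_filings.map (fun e => (PySem.Dict.mk e).getD "date" "")) (fun x => x)).getD ""
  let valid := pvValidB (PySem.List.slice s3_filings none (some 5))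
  match PySem.List.min? valid (fun x => x) with
  | none => "LOW"
  | some m => if m ≤ max_effect then "HIGH" else "LOW"

-- ===== PRECONDITION & SPEC =====
def Spec_calculate_dilution_risk_py (s3_filings : List (List (String × String))) (effect_filings : List (List (String × String))) (out : String) : Prop := out = calculate_dilution_risk_py_alt s3_filings effect_filings
instance (s3_filings : List (List (String × String))) (effect_filings : List (List (String × String))) (out : String) : Decidable (Spec_calculate_dilution_risk_py s3_filings effect_filings out) := by unfold Spec_calculate_dilution_risk_py; infer_instance

-- ===== CLAIM (what is proved, stated in full; the proofs are below) =====
def Claim_equal_calculate_dilution_risk_py : Prop := ∀ (s3_filings : List (List (String × String))) (effect_filings : List (List (String × String))), Dom_calculate_dilution_risk_py s3_filings effect_filings → Spec_calculate_dilution_risk_py s3_filings effect_filings (calculate_dilution_risk_py s3_filings effect_filings)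

-- ===== LEMMAS AND PROOFS =====

-- A's inner loop fires iff some effect date is ≥ the filing date
theorem pvInnerA_eq_true_iff (effs : List (List (String × String))) (fd : String) :
    pvInnerA effs fd = true ↔ ∃ e ∈ effs, fd ≤ (PySem.Dict.mk e).getD "date" "" := by
  induction effs with
  | nil => simp [pvInnerA]
  | cons e rest ih =>
      constructor
      · intro ht
        by_cases h : fd ≤ (PySem.Dict.mk e).getD "date" ""
        · exact ⟨e, List.mem_cons_self, h⟩
        · rw [pvInnerA, if_neg h] at ht
          obtain ⟨x, hx, hle⟩ := ih.1 ht
          exact ⟨x, List.mem_cons_of_mem _ hx, hle⟩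
      · rintro ⟨x, hx, hle⟩
        rw [pvInnerA]
        rcases List.mem_cons.1 hx with rfl | hx
        · rw [if_pos hle]
        · by_cases h : fd ≤ (PySem.Dict.mk e).getD "date" ""
          · rw [if_pos h]
          · rw [if_neg h]; exact ih.2 ⟨x, hx, hle⟩

-- A's outer loop: acc OR some valid date has a matching effect
theorem pvOuterA_eq (s3s effs : List (List (String × String))) (acc : Bool) :
    pvOuterA s3s effs acc = (acc || (pvValidB s3s).any (fun d => pvInnerA effs d)) := by
  induction s3s generalizing acc with
  | nil => simp [pvOuterA, pvValidB]
  | cons s3 rest ih =>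
      simp only [pvOuterA, pvValidB, List.filterMap_cons]
      cases hg : (PySem.Dict.mk s3).get? "date" with
      | none => simpa [pvValidB] using ih acc
      | some fd =>
          by_cases hfd : fd = ""
          · simp only [hfd]
            simpa [pvValidB] using ih acc
          · simp only [if_neg hfd]
            by_cases hin : pvInnerA effs fd = true
            · simp [hin, ih, pvValidB]
            · simp [hin, ih, pvValidB]

-- a nonempty string is not ≤ "" in the lexicographic string order
theorem pv_not_le_empty (s : String) (h : s ≠ "") : ¬ s ≤ "" := by
  intro hle
  apply h
  apply le_antisymm hle
  rw [String.le_iff_toList_le]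
  first
  | exact List.nil_le'
  | exact List.nil_le _
  | cases h : s.toList with
    | nil => exact le_refl _
    | cons a t => exact le_of_lt (List.nil_lt_cons a t)

-- every member of pvValidB is a nonempty string
theorem mem_pvValidB_ne (d : String) (xs : List (List (String × String)))
    (h : d ∈ pvValidB xs) : d ≠ "" := by
  obtain ⟨s3, _, hf⟩ := List.mem_filterMap.1 h
  cases hg : (PySem.Dict.mk s3).get? "date" with
  | none => rw [hg] at hf; simp at hf
  | some x =>
      rw [hg] at hf
      by_cases hx : x = ""
      · simp [hx] at hf
      · simp only [if_neg hx, Option.some.injEq] at hf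
        exact hf ▸ hx

theorem calculate_dilution_risk_py_spec : Claim_equal_calculate_dilution_risk_py := by
  intro s3s effs _
  unfold Spec_calculate_dilution_risk_py calculate_dilution_risk_py calculate_dilution_risk_py_alt
  simp only [pvOuterA_eq, Bool.false_or]
  set T := PySem.List.slice s3s none (some 5) with hT
  set f : List (String × String) → String := fun e => (PySem.Dict.mk e).getD "date" "" with hf
  set maxE := (PySem.List.max? (effs.map f) (fun x => x)).getD "" with hmaxE
  have key : (pvValidB T).any (fun d => pvInnerA effs d) = true ↔
      ∃ m, PySem.List.min? (pvValidB T) (fun x => x) = some m ∧ m ≤ maxE := by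
    constructor
    · intro hany
      obtain ⟨d, hd, hin⟩ := List.any_eq_true.1 hany
      obtain ⟨e, he, hde⟩ := (pvInnerA_eq_true_iff effs d).1 hin
      have hne : pvValidB T ≠ [] := fun hnil => by simp [hnil] at hd
      obtain ⟨m, hm⟩ := Option.ne_none_iff_exists'.1
        (fun h0 => hne ((PySem.List.min?_eq_none_iff (κ := String) _ _).1 h0))
      refine ⟨m, hm, ?_⟩
      have hmd : m ≤ d := PySem.List.min?_isMin hm d hd
      have hEne : effs.map f ≠ [] := fun h0 => by
        have : effs = [] := by simpa using h0
        simp [this] at he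
      obtain ⟨M, hM⟩ := Option.ne_none_iff_exists'.1
        (fun h0 => hEne ((PySem.List.max?_eq_none_iff (κ := String) _ _).1 h0))
      have heM : f e ≤ M := PySem.List.max?_isMax hM (f e) (List.mem_map_of_mem he)
      have : maxE = M := by rw [hmaxE, hM]; rfl
      rw [this]
      exact le_trans hmd (le_trans hde heM)
    · rintro ⟨m, hm, hle⟩
      have hmem : m ∈ pvValidB T := PySem.List.min?_mem hm
      have hmne : m ≠ "" := mem_pvValidB_ne m T hmem
      cases heffs : effs.map f with
      | nil =>
          exfalso
          have hE : maxE = "" := by rw [hmaxE, heffs]; rfl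
          exact pv_not_le_empty m hmne (hE ▸ hle)
      | cons a t =>
          have hne : effs.map f ≠ [] := by rw [heffs]; simp
          obtain ⟨M, hM⟩ := Option.ne_none_iff_exists'.1
            (fun h0 => hne ((PySem.List.max?_eq_none_iff (κ := String) _ _).1 h0))
          have hMmem : M ∈ effs.map f := PySem.List.max?_mem hM
          obtain ⟨e, he, hfe⟩ := List.mem_map.1 hMmem
          have hmaxM : maxE = M := by rw [hmaxE, hM]; rfl
          refine List.any_eq_true.2 ⟨m, hmem, ?_⟩
          refine (pvInnerA_eq_true_iff effs m).2 ⟨e, he, ?_⟩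
          have hEq : maxE = (PySem.Dict.mk e).getD "date" "" := hmaxM.trans hfe.symm
          exact le_of_le_of_eq hle hEq
      
  cases hmin : PySem.List.min? (pvValidB T) (fun x => x) with
  | none =>
      have : pvValidB T = [] := (PySem.List.min?_eq_none_iff (κ := String) _ _).1 hmin
      simp [this]
  | some m =>
      by_cases hcmp : m ≤ maxE
      · have : (pvValidB T).any (fun d => pvInnerA effs d) = true := key.2 ⟨m, hmin, hcmp⟩
        simp [this, hcmp]
      · have : ¬ (pvValidB T).any (fun d => pvInnerA effs d) = true := by
          intro h
          obtain ⟨m', hm', hle'⟩ := key.1 h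
          rw [hmin] at hm'
          obtain rfl : m = m' := Option.some.inj hm'
          exact hcmp hle'
        simp only [Bool.not_eq_true] at this
        simp [this, hcmp]
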